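-- pv_equiv track=rewrite | github.com/trustlines-protocol/relay | relay/network_graph/fees.py | estimate_sendable_from_one_limiting_capacity
-- ===== SOURCE A (Python) =====
-- def estimate_max_fee_from_max_imbalance(divisor, imbalance):
--     """Gives a higher limit on the possible fee on a transfer bringing imbalance so that
--     fee_actual(imbalance - fee_estimation) <= fee_estimation
--     this function should estimate what needs to be substracted to imbalance to make it sendable"""
--
--     # TODO: either improve this function or remove it and use calculate_fees_reverse
--
--     if (imbalance <= 0):
--         fee_estimation = 0
--     else:
--         fee_estimation = (imbalance - 1) // (divisor - 1) + 1  # fees you would pay if you sent imbalance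
--         # fee_estimation = (imbalance - 1) // divisor + 1
--         # the error is that you should not pay fees on transferring the fees.
--
--     # fee_estimation -= fee_estimation // divisor  # this is wrong
--     # what needs to be removed is not the fee on fee_estimation but the fees on fee_actual
--
--     # fee_estimation = int((1+capacity/divisor)/(1+1/divisor))
--     # max_sendable = capacity - fee_estimation
--
--     return fee_estimation
--
-- def estimate_sendable_from_one_limiting_capacity(divisor, capacity, balance, number_of_hops_to_destination):
--     """Estimates the max sendable amount in a path where the limiting capacity is assumed to be in a single trustline
--     with given capacity, balance, and that is number_of_hops_to_destination away from the destination"""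
--
--     if divisor == 0:
--         return capacity
--
--     if number_of_hops_to_destination == 0:
--         return capacity
--
--     imbalance = capacity
--
--     if balance > 0:
--         imbalance -= balance
--
--     fee_estimation = estimate_max_fee_from_max_imbalance(divisor, imbalance)
--
--     max_sendable = capacity - fee_estimation
--
--     return estimate_sendable_from_one_limiting_capacity(divisor,
--                                                         max_sendable,
--                                                         balance,
--                                                         number_of_hops_to_destination - 1)
-- ===== SOURCE B (Python) =====
-- def estimate_sendable_from_one_limiting_capacity(divisor, capacity, balance, number_of_hops_to_destination):
--     """Iterative re-implementation: loop over the hops, stopping early once the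
--     fee estimate is zero (capacity is then a fixed point of the update)."""
--     if divisor == 0:
--         return capacity
--     floor = balance if balance > 0 else 0
--     for _ in range(number_of_hops_to_destination):
--         imbalance = capacity - floor
--         if imbalance <= 0:
--             break
--         capacity -= (imbalance - 1) // (divisor - 1) + 1
--     return capacity
-- ===== Notes on version B (the rewrite author's own statement) =====
-- stated objective: simpler
-- what changed: Tail recursion replaced by an iterative for-loop over the hop count that inlines the fee helper and breaks early once the fee estimate is zero (capacity is then a fixed point), instead of recursing the full remaining depth.
import Mathlib
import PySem

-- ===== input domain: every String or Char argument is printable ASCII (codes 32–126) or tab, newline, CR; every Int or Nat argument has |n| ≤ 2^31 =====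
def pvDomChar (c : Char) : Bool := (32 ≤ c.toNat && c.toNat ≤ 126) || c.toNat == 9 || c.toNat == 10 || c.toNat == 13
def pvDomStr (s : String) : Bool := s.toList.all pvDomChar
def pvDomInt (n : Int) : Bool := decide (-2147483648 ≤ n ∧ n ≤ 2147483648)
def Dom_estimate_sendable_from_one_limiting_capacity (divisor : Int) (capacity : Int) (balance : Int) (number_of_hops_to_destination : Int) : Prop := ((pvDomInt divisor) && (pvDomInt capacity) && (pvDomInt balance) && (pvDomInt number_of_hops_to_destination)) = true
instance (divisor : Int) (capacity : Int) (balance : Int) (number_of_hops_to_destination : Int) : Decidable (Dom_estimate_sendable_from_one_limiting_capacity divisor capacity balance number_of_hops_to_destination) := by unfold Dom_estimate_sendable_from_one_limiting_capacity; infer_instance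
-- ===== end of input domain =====

-- B replaces A's tail recursion by an iterative loop with an early break once the fee
-- estimate is zero (objective: simpler). Equivalence is about the return value.


-- ===== PORT A =====
-- helper: estimate_max_fee_from_max_imbalance (literal; Python // is PySem.Int.floordiv)
def estimate_max_fee_from_max_imbalance (divisor : Int) (imbalance : Int) : Int :=
  if imbalance ≤ 0 then 0
  else PySem.Int.floordiv (imbalance - 1) (divisor - 1) + 1

-- literal port of A's recursion; A tests `number_of_hops_to_destination == 0`, the `≤ 0`
-- guard only totalizes the Lean recursion (Python A raises RecursionError for hops < 0,
-- excluded by Pre_).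
def estimate_sendable_from_one_limiting_capacity (divisor : Int) (capacity : Int) (balance : Int) (number_of_hops_to_destination : Int) : Int :=
  if divisor = 0 then capacity
  else if number_of_hops_to_destination ≤ 0 then capacity
  else
    let imbalance := if 0 < balance then capacity - balance else capacity
    let fee_estimation := estimate_max_fee_from_max_imbalance divisor imbalance
    let max_sendable := capacity - fee_estimation
    estimate_sendable_from_one_limiting_capacity divisor max_sendable balance (number_of_hops_to_destination - 1)
termination_by number_of_hops_to_destination.toNat
decreasing_by omega

-- ===== PORT B =====
-- B's loop body: runs at most n iterations, breaks when imbalance ≤ 0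
def pvLoopB (divisor : Int) (floor : Int) (n : Nat) (capacity : Int) : Int :=
  match n with
  | 0 => capacity
  | Nat.succ m =>
    let imbalance := capacity - floor
    if imbalance ≤ 0 then capacity
    else pvLoopB divisor floor m (capacity - (PySem.Int.floordiv (imbalance - 1) (divisor - 1) + 1))

def estimate_sendable_from_one_limiting_capacity_alt (divisor : Int) (capacity : Int) (balance : Int) (number_of_hops_to_destination : Int) : Int :=
  if divisor = 0 then capacity
  else pvLoopB divisor (if 0 < balance then balance else 0) number_of_hops_to_destination.toNat capacity

-- ===== PRECONDITION & SPEC =====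
-- Pre_ excludes exactly the inputs where Python A raises: negative hop counts with divisor ≠ 0
-- (infinite recursion, RecursionError) and divisor == 1 with nonzero hops and positive initial
-- imbalance (ZeroDivisionError; B's own loop raises there too).
def Pre_estimate_sendable_from_one_limiting_capacity (divisor : Int) (capacity : Int) (balance : Int) (number_of_hops_to_destination : Int) : Prop :=
  (divisor = 0 ∨ 0 ≤ number_of_hops_to_destination) ∧
  (divisor = 1 → number_of_hops_to_destination = 0 ∨ capacity - (if 0 < balance then balance else 0) ≤ 0)
instance (divisor : Int) (capacity : Int) (balance : Int) (number_of_hops_to_destination : Int) : Decidable (Pre_estimate_sendable_from_one_limiting_capacity divisor capacity balance number_of_hops_to_destination) := by unfold Pre_estimate_sendable_from_one_limiting_capacity; infer_instance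
def pvWitness_estimate_sendable_from_one_limiting_capacity : Int × Int × Int × Int := (3, 100, 20, 2)

def Spec_estimate_sendable_from_one_limiting_capacity (divisor : Int) (capacity : Int) (balance : Int) (number_of_hops_to_destination : Int) (out : Int) : Prop := out = estimate_sendable_from_one_limiting_capacity_alt divisor capacity balance number_of_hops_to_destination
instance (divisor : Int) (capacity : Int) (balance : Int) (number_of_hops_to_destination : Int) (out : Int) : Decidable (Spec_estimate_sendable_from_one_limiting_capacity divisor capacity balance number_of_hops_to_destination out) := by unfold Spec_estimate_sendable_from_one_limiting_capacity; infer_instance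

-- ===== CLAIM (what is proved, stated in full; the proofs are below) =====
def Claim_equal_estimate_sendable_from_one_limiting_capacity : Prop := ∀ (divisor : Int) (capacity : Int) (balance : Int) (number_of_hops_to_destination : Int), Dom_estimate_sendable_from_one_limiting_capacity divisor capacity balance number_of_hops_to_destination → Pre_estimate_sendable_from_one_limiting_capacity divisor capacity balance number_of_hops_to_destination → Spec_estimate_sendable_from_one_limiting_capacity divisor capacity balance number_of_hops_to_destination (estimate_sendable_from_one_limiting_capacity divisor capacity balance number_of_hops_to_destination)
-- ===== LEMMAS AND PROOFS =====

-- once the imbalance is non-positive the fee is 0 and A's recursion leaves capacity fixed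
lemma estA_stable (divisor balance : Int) (n : Nat) (capacity : Int)
    (h : (if 0 < balance then capacity - balance else capacity) ≤ 0) :
    estimate_sendable_from_one_limiting_capacity divisor capacity balance (n : Int) = capacity := by
  induction n with
  | zero => unfold estimate_sendable_from_one_limiting_capacity; simp
  | succ m ih =>
    unfold estimate_sendable_from_one_limiting_capacity
    by_cases hd : divisor = 0
    · simp [hd]
    · have hn : ¬ ((m + 1 : Nat) : Int) ≤ 0 := by push_cast; omega
      simp only [hd, if_false, hn]
      have : estimate_max_fee_from_max_imbalance divisor
          (if 0 < balance then capacity - balance else capacity) = 0 := by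
        unfold estimate_max_fee_from_max_imbalance; simp [h]
      simp only [this, sub_zero]
      have : ((m + 1 : Nat) : Int) - 1 = (m : Int) := by push_cast; ring
      rw [this, ih]

lemma main_lemma (divisor balance : Int) (hd : divisor ≠ 0) (n : Nat) :
    ∀ capacity : Int,
      estimate_sendable_from_one_limiting_capacity divisor capacity balance (n : Int)
        = pvLoopB divisor (if 0 < balance then balance else 0) n capacity := by
  induction n with
  | zero =>
    intro capacity
    unfold estimate_sendable_from_one_limiting_capacity pvLoopB; simp
  | succ m ih =>
    intro capacity
    have himb : capacity - (if 0 < balance then balance else 0)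
        = (if 0 < balance then capacity - balance else capacity) := by
      split_ifs <;> ring
    unfold estimate_sendable_from_one_limiting_capacity pvLoopB
    have hn : ¬ ((m + 1 : Nat) : Int) ≤ 0 := by push_cast; omega
    simp only [hd, if_false, hn, himb]
    by_cases hle : (if 0 < balance then capacity - balance else capacity) ≤ 0
    · -- fee is 0: A recurses with unchanged capacity, B breaks
      have hfee : estimate_max_fee_from_max_imbalance divisor
          (if 0 < balance then capacity - balance else capacity) = 0 := by
        unfold estimate_max_fee_from_max_imbalance; simp [hle]
      simp only [hle, if_true, hfee, sub_zero]
      have hcast : ((m + 1 : Nat) : Int) - 1 = (m : Int) := by push_cast; ring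
      rw [hcast, estA_stable divisor balance m capacity hle]
    · have hfee : estimate_max_fee_from_max_imbalance divisor
          (if 0 < balance then capacity - balance else capacity)
          = PySem.Int.floordiv ((if 0 < balance then capacity - balance else capacity) - 1) (divisor - 1) + 1 := by
        unfold estimate_max_fee_from_max_imbalance; simp [hle]
      simp only [hle, if_false, hfee]
      have hcast : ((m + 1 : Nat) : Int) - 1 = (m : Int) := by push_cast; ring
      rw [hcast, ih]

-- ===== VERDICT (by name: the statement is the Claim_ definition above) =====
theorem estimate_sendable_from_one_limiting_capacity_spec : Claim_equal_estimate_sendable_from_one_limiting_capacity := by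
  intro divisor capacity balance hops _ hPre
  unfold Spec_estimate_sendable_from_one_limiting_capacity
  unfold estimate_sendable_from_one_limiting_capacity_alt
  by_cases hd : divisor = 0
  · simp [hd]
    unfold estimate_sendable_from_one_limiting_capacity
    simp [hd]
  · have hnn : 0 ≤ hops := by
      rcases hPre.1 with h | h
      · exact absurd h hd
      · exact h
    have h1 := main_lemma divisor balance hd hops.toNat capacity
    rw [Int.toNat_of_nonneg hnn] at h1
    simp only [hd, if_false]
    exact h1
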